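-- pv_equiv track=rewrite | github.com/guinpin/data_security_labs | lab2-ex4.py | delete_double_letters
-- ===== SOURCE A (Python) =====
-- def delete_double_letters(message):
--     mess = []
--     for letter in message:
--         mess.append(letter)
--
--     i = 0
--     for e in range(int(len(mess)/2)):
--         if mess[i] == mess[i+1]:
--             mess[i+1] = 'X'
--         i = i + 2
--     i = 0
--
--     changed_mes=[]
--
--     for x in range(1,int(len(mess)/2+1)):
--         changed_mes.append(mess[i:i+2])
--         i = i + 2
--     return changed_mes
-- ===== SOURCE B (Python) =====
-- def delete_double_letters(message):
--     mess = list(message)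
--     return [[a, 'X'] if a == b else [a, b]
--             for a, b in zip(mess[::2], mess[1::2])]
-- ===== Notes on version B (the rewrite author's own statement) =====
-- stated objective: simpler
-- what changed: Replaces A's three index-driven passes (explicit append loop to build the list, in-place mutation over a range with a manual index, then a second range loop slicing out chunks) with a single list comprehension zipping the even- and odd-position strides and emitting each pair directly.
import Mathlib
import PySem

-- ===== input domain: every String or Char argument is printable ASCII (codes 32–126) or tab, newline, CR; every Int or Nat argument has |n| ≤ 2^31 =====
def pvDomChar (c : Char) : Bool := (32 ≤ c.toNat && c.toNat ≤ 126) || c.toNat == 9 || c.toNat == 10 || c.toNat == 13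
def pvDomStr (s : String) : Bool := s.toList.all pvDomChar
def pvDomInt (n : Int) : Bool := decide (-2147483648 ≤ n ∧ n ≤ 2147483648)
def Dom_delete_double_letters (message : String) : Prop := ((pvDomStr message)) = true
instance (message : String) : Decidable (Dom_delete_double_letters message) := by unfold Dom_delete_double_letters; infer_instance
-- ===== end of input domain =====

-- B replaces A's three index-driven passes with one zip over the even/odd strides (objective: simpler).

-- ===== PORT A =====
-- body of A's mutation loop: 'if mess[i] == mess[i+1]: mess[i+1] = "X"; i = i + 2'
-- (indices are always in range here, so pyGetD/List.set are exact for Python's mess[i]/assignment)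
def pvMutBody (st : List String × Int) : List String × Int :=
  let m := if PySem.List.pyGetD st.1 st.2 "" == PySem.List.pyGetD st.1 (st.2 + 1) ""
           then st.1.set (st.2 + 1).toNat "X" else st.1
  (m, st.2 + 2)

-- body of A's chunking loop: 'changed_mes.append(mess[i:i+2]); i = i + 2'
def pvChunkBody (m : List String) (st : List (List String) × Int) : List (List String) × Int :=
  (st.1 ++ [PySem.List.slice m (some st.2) (some (st.2 + 2))], st.2 + 2)

def delete_double_letters (message : String) : List (List String) :=
  -- mess = []; for letter in message: mess.append(letter)
  let mess := message.toList.foldl (fun acc c => acc ++ [String.ofList [c]]) ([] : List String)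
  -- int(len(mess)/2) = len(mess) / 2 exactly (length is a nonnegative int)
  let mut1 := (PySem.List.pyRange 0 (Int.ofNat (mess.length / 2)) 1).foldl
      (fun st _ => pvMutBody st) (mess, (0 : Int))
  -- int(len(mess)/2 + 1) = len(mess) / 2 + 1 exactly (length is a nonnegative int)
  let chunk := (PySem.List.pyRange 1 (Int.ofNat (mess.length / 2) + 1) 1).foldl
      (fun st _ => pvChunkBody mut1.1 st) (([] : List (List String)), (0 : Int))
  chunk.1

-- ===== PORT B =====
-- mess[::2] (and, applied to mess.tail, mess[1::2]); hand port of the step-2 slice, exact for step 2 on any list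
def pvEvens {α : Type} : List α → List α
  | [] => []
  | [a] => [a]
  | a :: _ :: t => a :: pvEvens t

def delete_double_letters_alt (message : String) : List (List String) :=
  let mess := message.toList.map (fun c => String.ofList [c])
  ((pvEvens mess).zip (pvEvens mess.tail)).map
    (fun ab => if ab.1 == ab.2 then [ab.1, "X"] else [ab.1, ab.2])

-- ===== PRECONDITION & SPEC =====
def Spec_delete_double_letters (message : String) (out : List (List String)) : Prop := out = delete_double_letters_alt message
instance (message : String) (out : List (List String)) : Decidable (Spec_delete_double_letters message out) := by unfold Spec_delete_double_letters; infer_instance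

-- ===== CLAIM (what is proved, stated in full; the proofs are below) =====
def Claim_equal_delete_double_letters : Prop := ∀ (message : String), Dom_delete_double_letters message → Spec_delete_double_letters message (delete_double_letters message)

-- ===== LEMMAS AND PROOFS =====

-- k-fold iteration of a state transformer
def pvIter {α : Type} (f : α → α) : Nat → α → α
  | 0, s => s
  | k + 1, s => pvIter f k (f s)

-- what A's mutation pass does to the list
def pvFix : List String → List String
  | [] => []
  | [a] => [a]
  | a :: b :: t => a :: (if a == b then "X" else b) :: pvFix t

theorem pvFoldlConst {α : Type} (f : α → α) : ∀ (L : List Int) (s : α),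
    L.foldl (fun st _ => f st) s = pvIter f L.length s := by
  intro L; induction L with
  | nil => intro s; rfl
  | cons x xs ih => intro s; simp [List.foldl, pvIter, ih]


-- what A's chunking pass produces from the mutated list
def pvPairs : List String → List (List String)
  | [] => []
  | [_] => []
  | a :: b :: t => [a, b] :: pvPairs t

theorem pvFix_length : ∀ t : List String, (pvFix t).length = t.length := by
  intro t
  induction t using pvFix.induct with
  | case1 => rfl
  | case2 a => rfl
  | case3 a b r ih => simp [pvFix, ih]

theorem pvFoldl_map (f : Char → String) : ∀ (l : List Char) (acc : List String),
    l.foldl (fun acc c => acc ++ [f c]) acc = acc ++ l.map f := by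
  intro l
  induction l with
  | nil => intro acc; simp
  | cons c cs ih => intro acc; simp [List.foldl, ih]

theorem pvGetD_append_len (pre ys : List String) (y : String) (d : String) :
    PySem.List.pyGetD (pre ++ y :: ys) (pre.length : Int) d = y := by
  simp [PySem.List.pyGetD_natCast, List.getD]

theorem pvGetD_append_len1 (pre ys : List String) (y z : String) (d : String) :
    PySem.List.pyGetD (pre ++ y :: z :: ys) ((pre.length : Int) + 1) d = z := by
  have h : ((pre.length : Int) + 1) = ((pre.length + 1 : Nat) : Int) := by push_cast; ring
  rw [h, PySem.List.pyGetD_natCast]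
  simp [List.getD]

theorem pvSet_append_len1 (pre ys : List String) (y z w : String) :
    (pre ++ y :: z :: ys).set (pre.length + 1) w = pre ++ y :: w :: ys := by
  rw [List.set_append_right _ _ (by omega)]
  simp

theorem pvMut_go : ∀ (t pre : List String),
    pvIter pvMutBody (t.length / 2) (pre ++ t, (pre.length : Int)) =
      (pre ++ pvFix t, (pre.length : Int) + 2 * ((t.length / 2 : Nat) : Int)) := by
  intro t
  induction t using pvFix.induct with
  | case1 => intro pre; simp [pvIter, pvFix]
  | case2 a => intro pre; simp [pvIter, pvFix]
  | case3 a b r ih =>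
    intro pre
    have hk : (a :: b :: r).length / 2 = r.length / 2 + 1 := by simp; omega
    rw [hk, pvIter]
    have hbody : pvMutBody (pre ++ a :: b :: r, (pre.length : Int)) =
        ((pre ++ [a, if a == b then "X" else b]) ++ r, ((pre ++ [a, if a == b then "X" else b]).length : Int)) := by
      unfold pvMutBody
      rw [pvGetD_append_len, pvGetD_append_len1]
      have ht : ((pre.length : Int) + 1).toNat = pre.length + 1 := by omega
      rw [ht, pvSet_append_len1]
      by_cases h : a = b <;> simp [h]
    rw [hbody, ih]
    have hfix : pvFix (a :: b :: r) = a :: (if a == b then "X" else b) :: pvFix r := rfl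
    rw [hfix]
    simp only [Prod.mk.injEq]
    constructor
    · simp
    · simp only [List.length_append, List.length_cons, List.length_nil]
      push_cast; omega

theorem pvSlice_pair (pre ys : List String) (y z : String) :
    PySem.List.slice (pre ++ y :: z :: ys) (some (pre.length : Int)) (some ((pre.length : Int) + 2)) = [y, z] := by
  rw [PySem.List.slice_toNat _ (by positivity) (by positivity)]
  have h1 : ((pre.length : Int)).toNat = pre.length := by omega
  have h2 : ((pre.length : Int) + 2).toNat = pre.length + 2 := by omega
  rw [h1, h2]
  have h3 : pre.length + 2 - pre.length = 2 := by omega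
  rw [h3, List.drop_left]
  rfl

theorem pvChunk_go (m : List String) : ∀ (t pre : List String) (acc : List (List String)),
    m = pre ++ t →
    pvIter (pvChunkBody m) (t.length / 2) (acc, (pre.length : Int)) =
      (acc ++ pvPairs t, (pre.length : Int) + 2 * ((t.length / 2 : Nat) : Int)) := by
  intro t
  induction t using pvPairs.induct with
  | case1 => intro pre acc _; simp [pvIter, pvPairs]
  | case2 a => intro pre acc _; simp [pvIter, pvPairs]
  | case3 a b r ih =>
    intro pre acc hm
    have hk : (a :: b :: r).length / 2 = r.length / 2 + 1 := by simp; omega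
    rw [hk, pvIter]
    have hbody : pvChunkBody m (acc, (pre.length : Int)) =
        (acc ++ [[a, b]], ((pre ++ [a, b]).length : Int)) := by
      unfold pvChunkBody
      rw [hm, pvSlice_pair]
      simp only [Prod.mk.injEq, List.length_append, List.length_cons, List.length_nil]
      constructor
      · trivial
      · push_cast; ring
    rw [hbody, ih (pre ++ [a, b]) (acc ++ [[a, b]]) (by simp [hm])]
    have hp : pvPairs (a :: b :: r) = [a, b] :: pvPairs r := rfl
    rw [hp]
    simp only [Prod.mk.injEq]
    constructor
    · simp
    · simp only [List.length_append, List.length_cons, List.length_nil]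
      push_cast; omega

theorem pvEvens_cons {α : Type} (x : α) (xs : List α) :
    pvEvens (x :: xs) = x :: pvEvens xs.tail := by
  cases xs <;> rfl

theorem pvPairs_fix : ∀ l : List String,
    pvPairs (pvFix l) =
      ((pvEvens l).zip (pvEvens l.tail)).map
        (fun ab => if ab.1 == ab.2 then [ab.1, "X"] else [ab.1, ab.2]) := by
  intro l
  induction l using pvFix.induct with
  | case1 => rfl
  | case2 a => rfl
  | case3 a b r ih =>
    have h1 : pvFix (a :: b :: r) = a :: (if a == b then "X" else b) :: pvFix r := rfl
    rw [h1]
    have h2 : pvPairs (a :: (if a == b then "X" else b) :: pvFix r) =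
        [a, if a == b then "X" else b] :: pvPairs (pvFix r) := rfl
    rw [h2, ih]
    have h3 : pvEvens (a :: b :: r) = a :: pvEvens r := rfl
    have h4 : (a :: b :: r).tail = b :: r := rfl
    rw [h3, h4, pvEvens_cons b r]
    by_cases h : a = b <;> simp [h]

theorem delete_double_letters_spec : Claim_equal_delete_double_letters := by
  unfold Claim_equal_delete_double_letters
  intro message _
  unfold Spec_delete_double_letters delete_double_letters delete_double_letters_alt
  set l := message.toList.map (fun c => String.ofList [c]) with hl
  rw [pvFoldl_map]
  simp only [List.nil_append]
  rw [pvFoldlConst, pvFoldlConst]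
  have hr1 : (PySem.List.pyRange 0 (Int.ofNat (l.length / 2)) 1).length = l.length / 2 := by
    simp
    omega
  have hr2 : (PySem.List.pyRange 1 (Int.ofNat (l.length / 2) + 1) 1).length = l.length / 2 := by
    simp [PySem.List.pyRange_of_pos]
    split_ifs <;> omega
  rw [hr1, hr2]
  have hmut := pvMut_go l []
  simp only [List.nil_append, List.length_nil, Nat.cast_zero] at hmut
  rw [hmut]
  have hchunk := pvChunk_go (pvFix l) (pvFix l) [] [] (by simp)
  simp only [List.nil_append, List.length_nil, Nat.cast_zero, pvFix_length] at hchunk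
  rw [hchunk]
  exact pvPairs_fix l
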